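-- pv_equiv track=rewrite | github.com/vijethkash123/DSAPractice | Interview questions/TwillioInterviewQ1.py | find_optimal_middle_subsequence_sum
-- ===== SOURCE A (Python) =====
-- def find_optimal_middle_subsequence_sum(n, arr):
--     min_sum = float('inf')
--
--     for i in range(1, n - 1):
--         chosen_1 = arr[i]
--
--         left_min = min(arr[:i])
--         right_min = min(arr[i + 1:])
--
--         if left_min < chosen_1 > right_min:
--             current_sum = left_min + chosen_1 + right_min
--             min_sum = min(min_sum, current_sum)
--
--     return min_sum if min_sum != float('inf') else -1
-- ===== SOURCE B (Python) =====
-- def _pmins(xs):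
--     # running prefix minima: out[j] = min(xs[:j+1])
--     out = []
--     acc = None
--     for x in xs:
--         acc = x if acc is None else min(acc, x)
--         out.append(acc)
--     return out
--
--
-- def find_optimal_middle_subsequence_sum(n, arr):
--     best = None
--     if n >= 3:
--         pref = _pmins(arr)
--         suf = _pmins(arr[::-1])[::-1]
--         for i in range(1, n - 1):
--             l, c, r = pref[i - 1], arr[i], suf[i + 1]
--             if l < c and c > r:
--                 s = l + c + r
--                 if best is None or s < best:
--                     best = s
--     return -1 if best is None else best
-- ===== Notes on version B (the rewrite author's own statement) =====
-- stated objective: faster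
-- what changed: replaces the per-position min(arr[:i]) / min(arr[i+1:]) rescans with prefix-min and suffix-min arrays built once, then a single pass over the middle positions
import Mathlib
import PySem

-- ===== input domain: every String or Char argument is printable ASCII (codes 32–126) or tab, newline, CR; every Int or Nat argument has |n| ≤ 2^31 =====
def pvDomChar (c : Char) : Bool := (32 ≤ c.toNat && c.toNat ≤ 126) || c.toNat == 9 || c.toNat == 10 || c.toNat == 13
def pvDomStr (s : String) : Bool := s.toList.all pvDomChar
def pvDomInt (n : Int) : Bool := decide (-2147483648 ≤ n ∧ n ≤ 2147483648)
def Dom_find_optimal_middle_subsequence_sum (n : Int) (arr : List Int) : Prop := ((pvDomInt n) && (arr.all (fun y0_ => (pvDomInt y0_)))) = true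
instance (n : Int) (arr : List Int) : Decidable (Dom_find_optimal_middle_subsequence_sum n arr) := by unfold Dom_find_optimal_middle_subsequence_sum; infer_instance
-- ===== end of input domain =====

-- B replaces A's O(n^2) per-position rescans min(arr[:i]) / min(arr[i+1:]) by prefix-min and
-- suffix-min arrays built once, then a single O(n) pass over the middle positions.

-- ===== PORT A =====
def find_optimal_middle_subsequence_sum (n : Int) (arr : List Int) : Int :=
  let min_sum : Option Int :=
    (PySem.List.pyRange 1 (n - 1) 1).foldl (fun min_sum i =>
      match PySem.List.pyGet? arr i,
            PySem.List.min? (PySem.List.slice arr none (some i)) (fun y => y),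
            PySem.List.min? (PySem.List.slice arr (some (i + 1)) none) (fun y => y) with
      | some chosen_1, some left_min, some right_min =>
          if left_min < chosen_1 ∧ chosen_1 > right_min then
            match min_sum with
            | none => some (min_sum.getD (left_min + chosen_1 + right_min))
            | some m => some (min m (left_min + chosen_1 + right_min))
          else min_sum
      | _, _, _ => min_sum) none   -- the 'none' branches are unreachable under Pre_ (Python raises there)
  match min_sum with
  | none => -1
  | some m => m

-- ===== PORT B =====
-- running prefix minima: out[j] = min(xs[:j+1])  (B's helper _pmins)
def pvScanStep (st : List Int × Option Int) (x : Int) : List Int × Option Int :=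
  let acc := match st.2 with | none => x | some a => min a x
  (st.1 ++ [acc], some acc)

def pvPmins (xs : List Int) : List Int := (xs.foldl pvScanStep ([], none)).1

def find_optimal_middle_subsequence_sum_alt (n : Int) (arr : List Int) : Int :=
  let best : Option Int :=
    if 3 ≤ n then
      let pref := pvPmins arr
      let suf := (pvPmins arr.reverse).reverse
      (PySem.List.pyRange 1 (n - 1) 1).foldl (fun best i =>
        match PySem.List.pyGet? pref (i - 1) with
        | none => best   -- unreachable under Pre_ (Python raises there)
        | some l =>
          match PySem.List.pyGet? arr i with
          | none => best
          | some c =>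
            match PySem.List.pyGet? suf (i + 1) with
            | none => best
            | some r =>
              if l < c ∧ c > r then
                let s := l + c + r
                match best with
                | none => some s
                | some b => if s < b then some s else some b
              else best) none
    else none
  match best with
  | none => -1
  | some b => b

-- ===== PRECONDITION & SPEC =====
-- Pre_ excludes exactly the inputs where Python A raises (IndexError / ValueError on min of an
-- empty slice): those with 3 ≤ n but n > len(arr).
def Pre_find_optimal_middle_subsequence_sum (n : Int) (arr : List Int) : Prop :=
  3 ≤ n → n ≤ (arr.length : Int)
instance (n : Int) (arr : List Int) : Decidable (Pre_find_optimal_middle_subsequence_sum n arr) := by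
  unfold Pre_find_optimal_middle_subsequence_sum; infer_instance
def pvWitness_find_optimal_middle_subsequence_sum : Int × List Int := (4, [5, 1, 9, 2])

def Spec_find_optimal_middle_subsequence_sum (n : Int) (arr : List Int) (out : Int) : Prop := out = find_optimal_middle_subsequence_sum_alt n arr
instance (n : Int) (arr : List Int) (out : Int) : Decidable (Spec_find_optimal_middle_subsequence_sum n arr out) := by unfold Spec_find_optimal_middle_subsequence_sum; infer_instance

-- ===== CLAIM (what is proved, stated in full; the proofs are below) =====
def Claim_equal_find_optimal_middle_subsequence_sum : Prop := ∀ (n : Int) (arr : List Int), Dom_find_optimal_middle_subsequence_sum n arr → Pre_find_optimal_middle_subsequence_sum n arr → Spec_find_optimal_middle_subsequence_sum n arr (find_optimal_middle_subsequence_sum n arr)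

-- ===== LEMMAS AND PROOFS =====

-- min of a nonempty list, as Python's min: first element folded with min
def pvMinv : List Int → Int
  | [] => 0
  | x :: t => t.foldl min x

def pvScanMin : Int → List Int → List Int
  | _, [] => []
  | a, x :: t => min a x :: pvScanMin (min a x) t

theorem pvScanStep_foldl (xs : List Int) (p : List Int) (a : Int) :
    xs.foldl pvScanStep (p, some a) = (p ++ pvScanMin a xs, some (xs.foldl min a)) := by
  induction xs generalizing p a with
  | nil => simp [pvScanMin]
  | cons x t ih =>
      simp only [List.foldl_cons, pvScanStep, pvScanMin]
      rw [ih]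
      simp

theorem pvPmins_cons (x : Int) (t : List Int) : pvPmins (x :: t) = x :: pvScanMin x t := by
  simp only [pvPmins, List.foldl_cons, pvScanStep]
  rw [pvScanStep_foldl]
  simp

theorem pvScanMin_length (t : List Int) (a : Int) : (pvScanMin a t).length = t.length := by
  induction t generalizing a with
  | nil => rfl
  | cons x t ih => simp [pvScanMin, ih]

theorem pvPmins_length (xs : List Int) : (pvPmins xs).length = xs.length := by
  cases xs with
  | nil => rfl
  | cons x t => simp [pvPmins_cons, pvScanMin_length]

theorem pvScanMin_getElem? (t : List Int) (a : Int) (j : Nat) (h : j < t.length) :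
    (pvScanMin a t)[j]? = some ((t.take (j + 1)).foldl min a) := by
  induction t generalizing a j with
  | nil => simp at h
  | cons x t ih =>
      cases j with
      | zero => simp [pvScanMin]
      | succ j =>
          simp only [pvScanMin, List.getElem?_cons_succ, List.take_succ_cons, List.foldl_cons]
          exact ih (min a x) j (by simpa using h)

theorem pvPmins_getElem? (xs : List Int) (k : Nat) (h : k < xs.length) :
    (pvPmins xs)[k]? = some (pvMinv (xs.take (k + 1))) := by
  cases xs with
  | nil => simp at h
  | cons x t =>
      rw [pvPmins_cons]
      cases k with
      | zero => simp [pvMinv]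
      | succ k =>
          simp only [List.getElem?_cons_succ, List.take_succ_cons, pvMinv]
          exact pvScanMin_getElem? t x k (by simpa using h)

theorem pvMinv_mem (l : List Int) (h : l ≠ []) : pvMinv l ∈ l := by
  cases l with
  | nil => exact absurd rfl h
  | cons x t =>
      simp only [pvMinv]
      rcases PySem.List.foldl_min_mem t x with h1 | h1
      · rw [h1]; exact List.mem_cons_self
      · exact List.mem_cons_of_mem _ h1

theorem pvMinv_le (l : List Int) (b : Int) (hb : b ∈ l) : pvMinv l ≤ b := by
  cases l with
  | nil => simp at hb
  | cons x t =>
      simp only [pvMinv]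
      rcases List.mem_cons.mp hb with rfl | hb
      · exact (PySem.List.foldl_min_le t b).1
      · exact (PySem.List.foldl_min_le t x).2 b hb

theorem pvMinv_reverse (l : List Int) (h : l ≠ []) : pvMinv l.reverse = pvMinv l := by
  have hr : l.reverse ≠ [] := by simpa using h
  apply le_antisymm
  · exact pvMinv_le _ _ (by simpa using pvMinv_mem l h)
  · exact pvMinv_le _ _ (by simpa using pvMinv_mem l.reverse hr)

theorem pvMin?_id (l : List Int) (h : l ≠ []) :
    PySem.List.min? l (fun y => y) = some (pvMinv l) := by
  cases l with
  | nil => exact absurd rfl h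
  | cons x t => rw [PySem.List.min?_id_cons]; rfl

-- ===== VERDICT (by name: the statement is the Claim_ definition above) =====
theorem find_optimal_middle_subsequence_sum_spec : Claim_equal_find_optimal_middle_subsequence_sum := by
  intro n arr _ hpre
  unfold Spec_find_optimal_middle_subsequence_sum
  unfold find_optimal_middle_subsequence_sum find_optimal_middle_subsequence_sum_alt
  by_cases hn : 3 ≤ n
  · have hm : n ≤ (arr.length : Int) := hpre hn
    rw [if_pos hn]
    have hfold :
        (PySem.List.pyRange 1 (n - 1) 1).foldl (fun min_sum i =>
          match PySem.List.pyGet? arr i,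
                PySem.List.min? (PySem.List.slice arr none (some i)) (fun y => y),
                PySem.List.min? (PySem.List.slice arr (some (i + 1)) none) (fun y => y) with
          | some chosen_1, some left_min, some right_min =>
              if left_min < chosen_1 ∧ chosen_1 > right_min then
                match min_sum with
                | none => some (min_sum.getD (left_min + chosen_1 + right_min))
                | some m => some (min m (left_min + chosen_1 + right_min))
              else min_sum
          | _, _, _ => min_sum) (none : Option Int)
        =
        (PySem.List.pyRange 1 (n - 1) 1).foldl (fun best i =>
          match PySem.List.pyGet? (pvPmins arr) (i - 1) with
          | none => best
          | some l =>
            match PySem.List.pyGet? arr i with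
            | none => best
            | some c =>
              match PySem.List.pyGet? ((pvPmins arr.reverse).reverse) (i + 1) with
              | none => best
              | some r =>
                if l < c ∧ c > r then
                  let s := l + c + r
                  match best with
                  | none => some s
                  | some b => if s < b then some s else some b
                else best) (none : Option Int) := by
      apply PySem.List.foldl_congr_mem
      intro acc i hi
      rw [PySem.List.mem_pyRange_one] at hi
      obtain ⟨hi1, hi2⟩ := hi
      obtain ⟨k, rfl⟩ : ∃ k : Nat, i = (k : Int) := ⟨i.toNat, (Int.toNat_of_nonneg (by omega)).symm⟩
      have hk1 : 1 ≤ k := by exact_mod_cast hi1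
      have hkm : k + 1 < arr.length := by
        have : (k : Int) < (arr.length : Int) - 1 := by omega
        exact_mod_cast by omega
      -- chosen element
      have hc : PySem.List.pyGet? arr (k : Int) = some arr[k] := by
        rw [PySem.List.pyGet?_natCast, List.getElem?_eq_getElem (by omega)]
      -- A's left slice
      have htake_ne : arr.take k ≠ [] := by
        have : (arr.take k).length = k := by simp; omega
        intro hnil; rw [hnil] at this; simp at this; omega
      have hleftA : PySem.List.min? (PySem.List.slice arr none (some (k : Int))) (fun y => y)
          = some (pvMinv (arr.take k)) := by
        rw [PySem.List.slice_to_natCast, pvMin?_id _ htake_ne]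
      -- A's right slice
      have hdrop_ne : arr.drop (k + 1) ≠ [] := by
        have : (arr.drop (k + 1)).length = arr.length - (k + 1) := by simp
        intro hnil; rw [hnil] at this; simp at this; omega
      have hrightA : PySem.List.min? (PySem.List.slice arr (some ((k : Int) + 1)) none) (fun y => y)
          = some (pvMinv (arr.drop (k + 1))) := by
        have : ((k : Int) + 1) = ((k + 1 : Nat) : Int) := by push_cast; ring
        rw [this, PySem.List.slice_from_natCast, pvMin?_id _ hdrop_ne]
      -- B's pref lookup
      have hleftB : PySem.List.pyGet? (pvPmins arr) ((k : Int) - 1) = some (pvMinv (arr.take k)) := by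
        have h1 : ((k : Int) - 1) = ((k - 1 : Nat) : Int) := by omega
        rw [h1, PySem.List.pyGet?_natCast, pvPmins_getElem? arr (k - 1) (by omega),
          Nat.sub_add_cancel hk1]
      -- B's suf lookup
      have hrightB : PySem.List.pyGet? ((pvPmins arr.reverse).reverse) ((k : Int) + 1)
          = some (pvMinv (arr.drop (k + 1))) := by
        have h1 : ((k : Int) + 1) = ((k + 1 : Nat) : Int) := by push_cast; ring
        rw [h1, PySem.List.pyGet?_natCast]
        have hlen : k + 1 < (pvPmins arr.reverse).length := by
          rw [pvPmins_length]; simpa using hkm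
        have h2 : (pvPmins arr.reverse).length - 1 - (k + 1) < arr.reverse.length := by
          rw [pvPmins_length, List.length_reverse]; omega
        rw [List.getElem?_reverse hlen, pvPmins_getElem? _ _ h2]
        have harg : (pvPmins arr.reverse).length - 1 - (k + 1) + 1 = arr.length - (k + 1) := by
          rw [pvPmins_length, List.length_reverse]; omega
        rw [harg, ← List.reverse_drop, pvMinv_reverse _ hdrop_ne]
      rw [hc, hleftA, hrightA, hleftB, hrightB]
      by_cases hcond : pvMinv (arr.take k) < arr[k] ∧ arr[k] > pvMinv (arr.drop (k + 1))
      · simp only [if_pos hcond]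
        cases acc with
        | none => simp
        | some b =>
            dsimp only
            split_ifs with h
            · simp [min_eq_right h.le]
            · simp [min_eq_left (by omega : b ≤ pvMinv (List.take k arr) + arr[k] + pvMinv (List.drop (k + 1) arr))]
      · simp [if_neg hcond]
    rw [hfold]
  · rw [if_neg hn]
    have hr : PySem.List.pyRange 1 (n - 1) 1 = [] := PySem.List.pyRange_one_eq_nil (by omega)
    rw [hr]
    simp
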